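-- pv_equiv track=rewrite | github.com/turvik0/algorithms_mipt | week11_12/30.py | edjclr
-- ===== SOURCE A (Python) =====
-- def edjclr(gnmm):
--     g = []
--     for p in gnmm:
--         s = roundupp(p)
--         for j in range(len(s) // 2):
--             firsts = 1 + 2 * j
--             seconds = (2 + 2 * j) % len(s)
--             e = (s[firsts], s[seconds])
--             g.append(e)
--     return g
--
-- def roundupp(p):
--     itemds = []
--     for i in p:
--         if i > 0:
--             itemds.append(2 * i - 1)
--             itemds.append(2 * i)
--         else:
--             itemds.append(-2 * i)
--             itemds.append(-2 * i - 1)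
--     return itemds
-- ===== SOURCE B (Python) =====
-- def _inn(i):
--     return 2 * i - 1 if i > 0 else -2 * i
--
-- def _out(i):
--     return 2 * i if i > 0 else -2 * i - 1
--
-- def edjclr(gnmm):
--     g = []
--     for p in gnmm:
--         if not p:
--             continue
--         wrap = _inn(p[0])
--         prev = _out(p[0])
--         for cur in p[1:]:
--             g.append((prev, _inn(cur)))
--             prev = _out(cur)
--         g.append((prev, wrap))
--     return g
-- ===== Notes on version B (the rewrite author's own statement) =====
-- stated objective: alternative
-- what changed: B is a single streaming pass carrying only O(1) state (the previous element's out-vertex and the saved wrap target), emitting each edge as it goes; A first materialises the whole flattened doubled vertex list and then runs a second indexed loop with floor-division and modulus over it.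
import Mathlib
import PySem

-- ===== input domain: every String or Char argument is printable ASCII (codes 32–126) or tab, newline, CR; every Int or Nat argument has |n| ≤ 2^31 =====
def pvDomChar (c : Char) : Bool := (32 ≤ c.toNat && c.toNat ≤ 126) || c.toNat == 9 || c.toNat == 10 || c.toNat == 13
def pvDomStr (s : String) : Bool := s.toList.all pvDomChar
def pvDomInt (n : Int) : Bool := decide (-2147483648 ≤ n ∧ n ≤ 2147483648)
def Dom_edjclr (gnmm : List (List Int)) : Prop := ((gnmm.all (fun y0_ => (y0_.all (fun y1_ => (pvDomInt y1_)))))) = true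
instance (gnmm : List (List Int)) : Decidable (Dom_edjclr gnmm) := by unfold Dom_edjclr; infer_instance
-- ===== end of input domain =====

-- B replaces A's two staged passes (materialise the flattened doubled vertex list, then an
-- indexed loop with // and % over it) by one streaming pass per sequence that carries only the
-- previous element's out-vertex and the saved wrap target (objective: alternative; same cost).


-- ===== PORT A =====
def roundupp (p : List Int) : List Int :=
  p.foldl (fun itemds i =>
    if i > 0 then (itemds ++ [2 * i - 1]) ++ [2 * i]
    else (itemds ++ [-2 * i]) ++ [-2 * i - 1]) []

-- both indexings s[firsts], s[seconds] are always in range (len s even, 1+2j < len s,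
-- (2+2j) % len s < len s), so pyGetD with a dummy default is exact here
def edjclr (gnmm : List (List Int)) : List (Int × Int) :=
  gnmm.foldl (fun g p =>
    let s := roundupp p
    (PySem.List.pyRange 0 (PySem.Int.floordiv (s.length : Int) 2) 1).foldl (fun g j =>
      let firsts := 1 + 2 * j
      let seconds := PySem.Int.mod (2 + 2 * j) (s.length : Int)
      g ++ [(PySem.List.pyGetD s firsts 0, PySem.List.pyGetD s seconds 0)]) g) []

-- ===== PORT B =====
def pvInn (i : Int) : Int := if i > 0 then 2 * i - 1 else -2 * i
def pvOut (i : Int) : Int := if i > 0 then 2 * i else -2 * i - 1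

def edjclr_alt (gnmm : List (List Int)) : List (Int × Int) :=
  gnmm.foldl (fun g p =>
    match p with
    | [] => g
    | h :: t =>
      let wrap := pvInn h
      let r := t.foldl (fun (gp : List (Int × Int) × Int) cur =>
        (gp.1 ++ [(gp.2, pvInn cur)], pvOut cur)) (g, pvOut h)
      r.1 ++ [(r.2, wrap)]) []

-- ===== PRECONDITION & SPEC =====
def Spec_edjclr (gnmm : List (List Int)) (out : List (Int × Int)) : Prop := out = edjclr_alt gnmm
instance (gnmm : List (List Int)) (out : List (Int × Int)) : Decidable (Spec_edjclr gnmm out) := by unfold Spec_edjclr; infer_instance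

-- ===== CLAIM (what is proved, stated in full; the proofs are below) =====
def Claim_equal_edjclr : Prop := ∀ (gnmm : List (List Int)), Dom_edjclr gnmm → Spec_edjclr gnmm (edjclr gnmm)

-- ===== LEMMAS AND PROOFS =====

-- roundupp is the flatMap of the two transformed values
theorem roundupp_eq_flatMap (p : List Int) :
    roundupp p = p.flatMap (fun i => [pvInn i, pvOut i]) := by
  unfold roundupp
  suffices h : ∀ (acc : List Int),
      p.foldl (fun itemds i =>
        if i > 0 then (itemds ++ [2 * i - 1]) ++ [2 * i]
        else (itemds ++ [-2 * i]) ++ [-2 * i - 1]) acc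
        = acc ++ p.flatMap (fun i => [pvInn i, pvOut i]) by
    simpa using h []
  induction p with
  | nil => intro acc; simp
  | cons x xs ih =>
    intro acc
    simp only [List.foldl_cons, List.flatMap_cons, ih, pvInn, pvOut]
    split_ifs <;> simp

theorem length_flat (p : List Int) :
    (p.flatMap (fun i => [pvInn i, pvOut i])).length = 2 * p.length := by
  induction p with
  | nil => simp
  | cons x xs ih => simp [ih]; omega

-- reading the flattened list at even / odd positions
theorem flat_getD_even (p : List Int) (k : Nat) :
    (p.flatMap (fun i => [pvInn i, pvOut i])).getD (2 * k) 0 = (p.map pvInn).getD k 0 := by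
  induction p generalizing k with
  | nil => simp
  | cons x xs ih =>
    cases k with
    | zero => simp
    | succ k =>
      have h2 : 2 * (k + 1) = (2 * k) + 1 + 1 := by omega
      rw [h2]
      simp only [List.flatMap_cons, List.cons_append,
        List.getD_cons_succ, List.map_cons]
      exact ih k

theorem flat_getD_odd (p : List Int) (k : Nat) :
    (p.flatMap (fun i => [pvInn i, pvOut i])).getD (2 * k + 1) 0 = (p.map pvOut).getD k 0 := by
  induction p generalizing k with
  | nil => simp
  | cons x xs ih =>
    cases k with
    | zero => simp
    | succ k =>
      have h2 : 2 * (k + 1) + 1 = (2 * k + 1) + 1 + 1 := by omega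
      rw [h2]
      simp only [List.flatMap_cons, List.cons_append,
        List.getD_cons_succ, List.map_cons]
      exact ih k

-- the rotated list read at position k < length
theorem rot_getD (l : List Int) (k : Nat) (hk : k < l.length) :
    (l.drop 1 ++ l.take 1).getD k 0
      = if k + 1 < l.length then l.getD (k + 1) 0 else l.getD 0 0 := by
  simp only [List.getD_eq_getElem?_getD, List.getElem?_append]
  by_cases h : k < (l.drop 1).length
  · simp only [List.length_drop] at h
    rw [if_pos (by simpa using h), if_pos (by omega)]
    simp
  · simp only [List.length_drop] at h
    rw [if_neg (by simpa using h), if_neg (by omega)]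
    have hk1 : k - (l.drop 1).length = 0 := by simp; omega
    rw [hk1]
    cases l with
    | nil => simp at hk
    | cons a l => simp

-- one sequence: A's inner loop equals the zip characterisation, appended to the accumulator
theorem per_seq (p : List Int) (g : List (Int × Int)) :
    (let s := roundupp p
     (PySem.List.pyRange 0 (PySem.Int.floordiv (s.length : Int) 2) 1).foldl (fun g j =>
        g ++ [(PySem.List.pyGetD s (1 + 2 * j) 0,
               PySem.List.pyGetD s (PySem.Int.mod (2 + 2 * j) (s.length : Int)) 0)]) g)
    = g ++ (p.map pvOut).zip ((p.map pvInn).drop 1 ++ (p.map pvInn).take 1) := by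
  set s := roundupp p with hs
  set m := p.length with hm
  have hflat : s = p.flatMap (fun i => [pvInn i, pvOut i]) := roundupp_eq_flatMap p
  have hlen : s.length = 2 * m := by rw [hflat]; exact length_flat p
  have hdiv : PySem.Int.floordiv (s.length : Int) 2 = (m : Int) := by
    have h := PySem.Int.floordiv_natCast (2 * m) 2
    rw [Nat.mul_div_cancel_left m (by norm_num : 0 < 2)] at h
    rw [hlen]
    exact_mod_cast h
  simp only [hdiv]
  rw [PySem.List.foldl_append_singleton_eq_map]
  congr 1
  rw [PySem.List.pyRange_zero_nat, List.map_map]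
  apply List.ext_getElem
  · simp [List.length_zip, List.length_take, hm]
    omega
  · intro k h1 h2
    simp only [List.getElem_map, List.getElem_range, Function.comp_apply, List.getElem_zip]
    have hkm : k < m := by simpa [hm] using h1
    have hkp : k < p.length := by omega
    rw [Prod.mk.injEq]
    constructor
    · -- first component: s[1 + 2k] = (map pvOut p)[k]
      have hcast : (1 : Int) + 2 * (k : Int) = ((2 * k + 1 : Nat) : Int) := by push_cast; ring
      rw [hcast, PySem.List.pyGetD_natCast, hflat, flat_getD_odd,
        List.getD_eq_getElem _ _ (by simpa using hkp), List.getElem_map]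
    · -- second component: s[(2 + 2k) % (2m)] = rotated inn-list at k
      have hcast : (2 : Int) + 2 * (k : Int) = ((2 + 2 * k : Nat) : Int) := by push_cast; ring
      have hlen2 : (s.length : Int) = ((2 * m : Nat) : Int) := by exact_mod_cast hlen
      rw [hlen2, hcast, PySem.Int.mod_natCast, PySem.List.pyGetD_natCast]
      have hrotlen : k < ((p.map pvInn).drop 1 ++ (p.map pvInn).take 1).length := by
        simp; omega
      rw [(List.getD_eq_getElem _ 0 hrotlen).symm,
        rot_getD (p.map pvInn) k (by simpa using hkp)]
      by_cases hlast : k + 1 < m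
      · have hmod : (2 + 2 * k) % (2 * m) = 2 * (k + 1) := by
          rw [Nat.mod_eq_of_lt (by omega)]; omega
        rw [hmod, hflat, flat_getD_even, if_pos (by simpa [hm] using hlast)]
      · have hmod : (2 + 2 * k) % (2 * m) = 2 * 0 := by
          rw [show 2 + 2 * k = 2 * m by omega, Nat.mod_self]
        rw [hmod, hflat, flat_getD_even, if_neg (by simpa [hm] using hlast)]

-- B's streaming loop, characterised as a zip
theorem stream_eq_zip (t : List Int) (g : List (Int × Int)) (prev wrap : Int) :
    (t.foldl (fun (gp : List (Int × Int) × Int) cur =>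
        (gp.1 ++ [(gp.2, pvInn cur)], pvOut cur)) (g, prev)).1
      ++ [((t.foldl (fun (gp : List (Int × Int) × Int) cur =>
        (gp.1 ++ [(gp.2, pvInn cur)], pvOut cur)) (g, prev)).2, wrap)]
    = g ++ (prev :: t.map pvOut).zip (t.map pvInn ++ [wrap]) := by
  induction t generalizing g prev with
  | nil => simp
  | cons c cs ih =>
    simp only [List.foldl_cons, List.map_cons, List.cons_append, List.zip_cons_cons]
    rw [ih (g ++ [(prev, pvInn c)]) (pvOut c)]
    simp

-- ===== VERDICT (by name: the statement is the Claim_ definition above) =====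
theorem edjclr_spec : Claim_equal_edjclr := by
  intro gnmm hdom
  clear hdom
  unfold Spec_edjclr edjclr edjclr_alt
  suffices h : ∀ (g : List (Int × Int)),
      gnmm.foldl (fun g p =>
        let s := roundupp p
        (PySem.List.pyRange 0 (PySem.Int.floordiv (s.length : Int) 2) 1).foldl (fun g j =>
          g ++ [(PySem.List.pyGetD s (1 + 2 * j) 0,
                 PySem.List.pyGetD s (PySem.Int.mod (2 + 2 * j) (s.length : Int)) 0)]) g) g
      = gnmm.foldl (fun g p =>
          match p with
          | [] => g
          | h :: t =>
            let wrap := pvInn h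
            let r := t.foldl (fun (gp : List (Int × Int) × Int) cur =>
              (gp.1 ++ [(gp.2, pvInn cur)], pvOut cur)) (g, pvOut h)
            r.1 ++ [(r.2, wrap)]) g by
    exact h []
  induction gnmm with
  | nil => intro g; rfl
  | cons p ps ih =>
    intro g
    simp only [List.foldl_cons]
    rw [per_seq p g, ih]
    congr 1
    cases p with
    | nil => simp
    | cons h t =>
      show _ = (t.foldl (fun (gp : List (Int × Int) × Int) cur =>
          (gp.1 ++ [(gp.2, pvInn cur)], pvOut cur)) (g, pvOut h)).1
        ++ [((t.foldl (fun (gp : List (Int × Int) × Int) cur =>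
          (gp.1 ++ [(gp.2, pvInn cur)], pvOut cur)) (g, pvOut h)).2, pvInn h)]
      rw [stream_eq_zip t g (pvOut h) (pvInn h)]
      simp
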